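-- pv_equiv track=rewrite | github.com/ywatanabe1989/scitex-python | src/mcp_servers/scitex-io-translator/translators/template_translator.py | _separate_imports
-- ===== SOURCE A (Python) =====
-- from typing import Tuple, Optional
--
-- def _separate_imports(code: str) -> Tuple[str, str]:
--     """Separate imports from main code."""
--     lines = code.split("\n")
--     import_lines = []
--     main_lines = []
--
--     in_imports = True
--     for line in lines:
--         if in_imports:
--             if (
--                 line.strip().startswith("import ")
--                 or line.strip().startswith("from ")
--                 or line.strip() == ""
--                 or line.strip().startswith("#")
--             ):
--                 import_lines.append(line)
--             else:
--                 in_imports = False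
--                 main_lines.append(line)
--         else:
--             main_lines.append(line)
--
--     return "\n".join(import_lines).strip(), "\n".join(main_lines).strip()
-- ===== SOURCE B (Python) =====
-- from typing import Tuple
--
-- def _separate_imports(code: str) -> Tuple[str, str]:
--     """Separate imports from main code.
--
--     Streaming version: never builds a list of lines.  It consumes the raw
--     string one line at a time with split("\n", 1), advancing a character
--     offset past each accepted import/blank/comment line, and finally cuts
--     the ORIGINAL string once at that offset (the two halves are stripped,
--     so a trailing newline left at the cut is harmless)."""
--     head_len = 0
--     rest = code
--     while True:
--         parts = rest.split("\n", 1)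
--         s = parts[0].strip()
--         if not (s.startswith("import ") or s.startswith("from ")
--                 or s == "" or s.startswith("#")):
--             break
--         if len(parts) == 1:          # last line, no newline after it
--             head_len += len(parts[0])
--             break
--         head_len += len(parts[0]) + 1
--         rest = parts[1]
--     return code[:head_len].strip(), code[head_len:].strip()
-- ===== Notes on version B (the rewrite author's own statement) =====
-- stated objective: alternative
-- what changed: B never builds the list of lines or A's two accumulator lists: it streams over the raw string with split('\n', 1), advancing a character offset past each accepted import/blank/comment line, and finally cuts the original string once at that offset.
import Mathlib
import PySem

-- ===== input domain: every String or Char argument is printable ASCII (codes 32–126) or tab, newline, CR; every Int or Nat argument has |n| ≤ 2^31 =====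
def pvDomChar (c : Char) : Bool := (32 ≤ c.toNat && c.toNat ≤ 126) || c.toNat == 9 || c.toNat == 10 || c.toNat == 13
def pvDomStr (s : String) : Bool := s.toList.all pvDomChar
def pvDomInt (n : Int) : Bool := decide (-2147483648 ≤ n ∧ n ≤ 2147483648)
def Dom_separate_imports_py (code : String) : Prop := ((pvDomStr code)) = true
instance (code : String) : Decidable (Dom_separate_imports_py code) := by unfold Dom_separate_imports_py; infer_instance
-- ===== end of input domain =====

-- B streams over the raw string with split("\n",1) and a running character offset,
-- then cuts the original string once; it never builds the list of lines or the two
-- accumulator lists A maintains. Objective: alternative (same O(n) cost).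


-- ===== PORT A =====
-- A's membership test for the import section (the Python re-computes line.strip() per check)
def sepCondA (line : String) : Bool :=
  PySem.Str.startswith (PySem.Str.strip line) "import "
  || PySem.Str.startswith (PySem.Str.strip line) "from "
  || (PySem.Str.strip line == "")
  || PySem.Str.startswith (PySem.Str.strip line) "#"

-- A's for-loop over (import_lines, main_lines, in_imports)
def sepLoopA : List String → List String × List String × Bool → List String × List String × Bool
  | [], st => st
  | line :: rest, (impL, mainL, inImports) =>
    if inImports then
      if sepCondA line then
        sepLoopA rest (impL ++ [line], mainL, inImports)
      else
        sepLoopA rest (impL, mainL ++ [line], false)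
    else
      sepLoopA rest (impL, mainL ++ [line], inImports)

def separate_imports_py (code : String) : String × String :=
  let lines := (PySem.Str.split? code "\n").getD []   -- sep "\n" ≠ "": split? is always some
  let res := sepLoopA lines ([], [], true)
  (PySem.Str.strip (PySem.Str.join "\n" res.1), PySem.Str.strip (PySem.Str.join "\n" res.2.1))

-- ===== PORT B =====
-- B's test on the already-stripped first part s = parts[0].strip()
def sepOkB (s : List Char) : Bool :=
  PySem.Chars.startswith s "import ".toList || PySem.Chars.startswith s "from ".toList
  || (s == []) || PySem.Chars.startswith s "#".toList

-- the hand-ported split's character test: c is not the separator '\n'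
def notNL (c : Char) : Bool := c ≠ '\n'

-- B's while loop over (rest, head_len).  rest.split("\n", 1) is ported by hand (PySem has
-- no partition/maxsplit-1 primitive of this shape): for the one-character separator "\n"
-- its first part is exactly the chars before the first '\n' (takeWhile), a second part
-- exists iff a '\n' occurs (iff that first part is shorter than rest), and the second
-- part is rest with the first part and the separating '\n' dropped.
def sepLoopB (rest : List Char) (headLen : Nat) : Nat :=
  let line := rest.takeWhile notNL
  let s := PySem.Chars.strip line
  if !sepOkB s then headLen
  else if line.length = rest.length then headLen + line.length  -- len(parts) == 1
  else sepLoopB (rest.drop (line.length + 1)) (headLen + line.length + 1)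
termination_by rest.length
decreasing_by
  have hl : line.length = (rest.takeWhile notNL).length := rfl
  have h2 : (rest.takeWhile notNL).length ≤ rest.length :=
    (List.takeWhile_prefix _).length_le
  simp only [List.length_drop]
  omega

def separate_imports_py_alt (code : String) : String × String :=
  let cs := code.toList
  let h := sepLoopB cs 0
  -- code[:h] and code[h:] with 0 ≤ h ≤ len(code) are exactly take/drop
  (PySem.Str.strip (String.ofList (cs.take h)), PySem.Str.strip (String.ofList (cs.drop h)))

-- ===== PRECONDITION & SPEC =====
def Spec_separate_imports_py (code : String) (out : String × String) : Prop := out = separate_imports_py_alt code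
instance (code : String) (out : String × String) : Decidable (Spec_separate_imports_py code out) := by unfold Spec_separate_imports_py; infer_instance

-- ===== CLAIM (what is proved, stated in full; the proofs are below) =====
def Claim_equal_separate_imports_py : Prop := ∀ (code : String), Dom_separate_imports_py code → Spec_separate_imports_py code (separate_imports_py code)

-- ===== LEMMAS AND PROOFS =====

-- one-step unfolding of B's loop
theorem sepLoopB_unfold (rest : List Char) (headLen : Nat) :
    sepLoopB rest headLen =
      if !sepOkB (PySem.Chars.strip (rest.takeWhile notNL)) then headLen
      else if (rest.takeWhile notNL).length = rest.length then
        headLen + (rest.takeWhile notNL).length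
      else sepLoopB (rest.drop ((rest.takeWhile notNL).length + 1))
             (headLen + (rest.takeWhile notNL).length + 1) := by
  rw [sepLoopB.eq_def]

-- proof-side: the list of lines of cs, by the same head-line/rest decomposition B walks
def charSplit (cs : List Char) : List (List Char) :=
  if (cs.takeWhile notNL).length = cs.length then
    [cs.takeWhile notNL]
  else
    cs.takeWhile notNL
      :: charSplit (cs.drop ((cs.takeWhile notNL).length + 1))
termination_by cs.length
decreasing_by
  have h2 : (cs.takeWhile notNL).length ≤ cs.length :=
    (List.takeWhile_prefix _).length_le
  simp only [List.length_drop]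
  omega

theorem charSplit_ne_nil (cs : List Char) : charSplit cs ≠ [] := by
  rw [charSplit.eq_def]; split <;> simp

-- prepend to the first piece
def consF (pre : List Char) : List (List Char) → List (List Char)
  | [] => [pre]
  | x :: xs => (pre ++ x) :: xs

theorem consF_nil (xs : List (List Char)) (h : xs ≠ []) : consF [] xs = xs := by
  cases xs with
  | nil => exact absurd rfl h
  | cons x xs => simp [consF]

-- dropWhile is drop at the takeWhile length
theorem dropWhile_eq_drop (p : Char → Bool) (cs : List Char) :
    cs.dropWhile p = cs.drop (cs.takeWhile p).length := by
  induction cs with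
  | nil => rfl
  | cons c t ih => by_cases h : p c <;> simp [h, ih]

-- head-line decomposition of a string containing a newline
theorem sep_decomp (cs : List Char)
    (h : (cs.takeWhile notNL).length ≠ cs.length) :
    cs = cs.takeWhile notNL
         ++ '\n' :: cs.drop ((cs.takeWhile notNL).length + 1) := by
  have hdw : cs.dropWhile notNL ≠ [] := by
    intro hnil
    have hs := List.takeWhile_append_dropWhile (p := notNL) (l := cs)
    rw [hnil, List.append_nil] at hs
    exact h (by rw [hs])
  obtain ⟨c, tl, hct⟩ := List.exists_cons_of_ne_nil hdw
  have hc : c = '\n' := by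
    have h1 := List.head_dropWhile_not notNL (l := cs) hdw
    have h3 : (cs.dropWhile notNL).head? = some c := by rw [hct]; rfl
    rw [List.head?_eq_some_head hdw] at h3
    rw [Option.some_inj.mp h3] at h1
    simpa [notNL] using h1
  have htl : tl = cs.drop ((cs.takeWhile notNL).length + 1) := by
    have h4 : cs.drop ((cs.takeWhile notNL).length + 1)
        = (cs.drop ((cs.takeWhile notNL).length)).drop 1 := by
      rw [List.drop_drop, Nat.add_comm]
    rw [h4, ← dropWhile_eq_drop, hct]
    simp
  conv_lhs => rw [← List.takeWhile_append_dropWhile (p := notNL) (l := cs), hct]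
  rw [hc, htl]

-- charSplit of a cons whose head is not a newline, under consF
theorem consF_charSplit_cons (c : Char) (hc : c ≠ '\n') (rest : List Char) (pre : List Char) :
    consF pre (charSplit (c :: rest)) = consF (pre ++ [c]) (charSplit rest) := by
  rw [charSplit.eq_def]
  have htw : (c :: rest).takeWhile notNL
      = c :: rest.takeWhile notNL := by
    simp [notNL, hc]
  rw [htw]
  by_cases h : (rest.takeWhile notNL).length = rest.length
  · rw [if_pos (by simp only [List.length_cons]; omega)]
    conv_rhs => rw [charSplit.eq_def]
    rw [if_pos h]
    simp [consF]
  · rw [if_neg (by simp only [List.length_cons]; omega)]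
    conv_rhs => rw [charSplit.eq_def]
    rw [if_neg h]
    simp [consF, List.drop_succ_cons]

-- PySem's fueled splitter, characterised by charSplit
theorem go_eq (fuel : Nat) : ∀ (l cur : List Char) (accL : List (List Char)),
    l.length < fuel →
    PySem.Chars.splitOn.go ['\n'] fuel l cur accL
      = accL.reverse ++ consF cur.reverse (charSplit l) := by
  induction fuel with
  | zero => intro l cur accL h; omega
  | succ n ih =>
    intro l cur accL h
    cases l with
    | nil =>
      rw [charSplit.eq_def]
      simp [PySem.Chars.splitOn.go, consF]
    | cons c rest =>
      by_cases hc : c = '\n'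
      · subst hc
        have hstep : PySem.Chars.splitOn.go ['\n'] (n+1) ('\n' :: rest) cur accL
            = PySem.Chars.splitOn.go ['\n'] n rest [] (cur.reverse :: accL) := by
          rw [PySem.Chars.splitOn.go]
          simp [List.isPrefixOf]
        rw [hstep, ih rest [] (cur.reverse :: accL) (by simp at h ⊢; omega)]
        have hcs : charSplit ('\n' :: rest) = [] :: charSplit rest := by
          rw [charSplit.eq_def]
          have : (('\n' :: rest).takeWhile notNL) = [] := by
            simp [notNL]
          rw [this]
          simp
        rw [hcs]
        simp only [List.reverse_nil]
        rw [consF_nil _ (charSplit_ne_nil rest)]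
        simp [consF]
      · have hstep : PySem.Chars.splitOn.go ['\n'] (n+1) (c :: rest) cur accL
            = PySem.Chars.splitOn.go ['\n'] n rest (c :: cur) accL := by
          rw [PySem.Chars.splitOn.go]
          simp [List.isPrefixOf]
          intro hh; exact absurd hh.symm hc
        rw [hstep, ih rest (c :: cur) accL (by simp at h ⊢; omega)]
        rw [consF_charSplit_cons c hc rest]
        simp

theorem splitOn_newline (cs : List Char) :
    PySem.Chars.splitOn cs ['\n'] = charSplit cs := by
  unfold PySem.Chars.splitOn
  rw [go_eq (cs.length + 1) cs [] [] (by omega)]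
  simp [consF_nil _ (charSplit_ne_nil cs)]

-- the boundary count of accepted leading lines (char level)
def bC : List (List Char) → Nat
  | [] => 0
  | l :: ls => if sepOkB (PySem.Chars.strip l) then bC ls + 1 else 0

-- A's per-line test equals B's test on the stripped line
theorem ofList_beq_empty (z : List Char) : (String.ofList z == "") = z.isEmpty := by
  cases z <;> simp [String.ofList_eq_empty_iff]

theorem condA_eq_okB (l : List Char) :
    sepCondA (String.ofList l) = sepOkB (PySem.Chars.strip l) := by
  simp [sepCondA, sepOkB, PySem.Str.strip, PySem.Str.startswith, ofList_beq_empty]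

-- A's boundary (index of the first line failing the test) over string lines
def sepBoundary : List String → Nat
  | [] => 0
  | line :: rest => if sepCondA line then sepBoundary rest + 1 else 0

theorem sepBoundary_map (ll : List (List Char)) :
    sepBoundary (ll.map String.ofList) = bC ll := by
  induction ll with
  | nil => rfl
  | cons l ls ih => simp [sepBoundary, bC, condA_eq_okB, ih]

-- A's loop computes the boundary split
theorem sepLoopA_false (ls : List String) : ∀ impL mainL,
    sepLoopA ls (impL, mainL, false) = (impL, mainL ++ ls, false) := by
  induction ls with
  | nil => simp [sepLoopA]
  | cons l rest ih => intro impL mainL; simp [sepLoopA, ih]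

theorem sepLoopA_true (ls : List String) : ∀ impL mainL,
    sepLoopA ls (impL, mainL, true)
      = (impL ++ ls.take (sepBoundary ls), mainL ++ ls.drop (sepBoundary ls), ls.all sepCondA) := by
  induction ls with
  | nil => simp [sepLoopA, sepBoundary]
  | cons l rest ih =>
    intro impL mainL
    by_cases h : sepCondA l
    · simp [sepLoopA, h, sepBoundary, ih]
    · simp [sepLoopA, h, sepBoundary, sepLoopA_false]

-- acc-shift for B's loop
theorem sepLoopB_shift : ∀ (n : Nat) (cs : List Char), cs.length ≤ n → ∀ acc,
    sepLoopB cs acc = acc + sepLoopB cs 0 := by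
  intro n
  induction n with
  | zero =>
    intro cs h acc
    have hnil : cs = [] := by cases cs <;> simp_all
    subst hnil
    by_cases hok : sepOkB (PySem.Chars.strip ([] : List Char)) <;>
      simp [sepLoopB_unfold, hok]
  | succ n ih =>
    intro cs h acc
    have hlt : (cs.takeWhile notNL).length ≤ cs.length :=
      (List.takeWhile_prefix _).length_le
    by_cases hok : sepOkB (PySem.Chars.strip (cs.takeWhile notNL))
    · by_cases heq : (cs.takeWhile notNL).length = cs.length
      · simp [sepLoopB_unfold, hok, heq]
      · have e1 : sepLoopB cs acc
            = sepLoopB (cs.drop ((cs.takeWhile notNL).length + 1))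
                (acc + (cs.takeWhile notNL).length + 1) := by
          rw [sepLoopB_unfold]; simp [hok, heq]
        have e2 : sepLoopB cs 0
            = sepLoopB (cs.drop ((cs.takeWhile notNL).length + 1))
                (0 + (cs.takeWhile notNL).length + 1) := by
          rw [sepLoopB_unfold]; simp [hok, heq]
        rw [e1, e2,
          ih _ (by simp only [List.length_drop]; omega)
            (acc + (cs.takeWhile notNL).length + 1),
          ih _ (by simp only [List.length_drop]; omega)
            (0 + (cs.takeWhile notNL).length + 1)]
        omega
    · simp [sepLoopB_unfold, hok]

theorem sepLoopB_shift' (cs : List Char) (acc : Nat) :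
    sepLoopB cs acc = acc + sepLoopB cs 0 :=
  sepLoopB_shift cs.length cs le_rfl acc

-- if the first line is rejected, B's offset is 0
theorem sepLoopB_zero_of_bC_zero (cs : List Char)
    (h : bC (charSplit cs) = 0) : sepLoopB cs 0 = 0 := by
  rw [charSplit.eq_def] at h
  rw [sepLoopB_unfold]
  split
  · rfl
  · exfalso
    rename_i hok
    split at h <;> simp_all [bC]

-- join of all lines gives back the string
theorem join_charSplit : ∀ (n : Nat) (cs : List Char), cs.length ≤ n →
    PySem.Chars.join ['\n'] (charSplit cs) = cs := by
  intro n
  induction n with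
  | zero =>
    intro cs h
    have hnil : cs = [] := by cases cs <;> simp_all
    subst hnil
    rw [charSplit.eq_def]; simp [PySem.Chars.join_singleton]
  | succ n ih =>
    intro cs h
    rw [charSplit.eq_def]
    split
    · rename_i heq
      rw [PySem.Chars.join_singleton]
      exact List.IsPrefix.eq_of_length (List.takeWhile_prefix _) heq
    · rename_i hne
      have hlt : (cs.takeWhile notNL).length ≤ cs.length :=
        (List.takeWhile_prefix _).length_le
      obtain ⟨y, ys, hys⟩ := List.exists_cons_of_ne_nil
        (charSplit_ne_nil (cs.drop ((cs.takeWhile notNL).length + 1)))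
      rw [hys, PySem.Chars.join_cons_cons, ← hys,
        ih _ (by simp only [List.length_drop]; omega)]
      conv_rhs => rw [sep_decomp cs hne]
      simp

-- B's offset drops exactly the accepted lines
theorem drop_sepLoopB : ∀ (n : Nat) (cs : List Char), cs.length ≤ n →
    cs.drop (sepLoopB cs 0)
      = PySem.Chars.join ['\n'] ((charSplit cs).drop (bC (charSplit cs))) := by
  intro n
  induction n with
  | zero =>
    intro cs h
    have hnil : cs = [] := by cases cs <;> simp_all
    subst hnil
    rw [sepLoopB_unfold, charSplit.eq_def]
    by_cases hok : sepOkB (PySem.Chars.strip ([] : List Char)) <;>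
      simp [hok, bC, PySem.Chars.join_nil, PySem.Chars.join_singleton]
  | succ n ih =>
    intro cs h
    have hlt : (cs.takeWhile notNL).length ≤ cs.length :=
      (List.takeWhile_prefix _).length_le
    by_cases heq : (cs.takeWhile notNL).length = cs.length
    · have hcs : charSplit cs = [cs.takeWhile notNL] := by
        rw [charSplit.eq_def, if_pos heq]
      by_cases hok : sepOkB (PySem.Chars.strip (cs.takeWhile notNL))
      · have hstep : sepLoopB cs 0 = (cs.takeWhile notNL).length := by
          rw [sepLoopB_unfold]; simp [hok, heq]
        rw [hstep, hcs]
        simp [bC, hok, PySem.Chars.join_nil, List.drop_eq_nil_of_le heq.ge]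
      · have hstep : sepLoopB cs 0 = 0 := by
          rw [sepLoopB_unfold]; simp [hok]
        rw [hstep, hcs]
        simp [bC, hok, PySem.Chars.join_singleton]
        exact (List.IsPrefix.eq_of_length (List.takeWhile_prefix _) heq).symm
    · have hcs : charSplit cs
          = cs.takeWhile notNL
            :: charSplit (cs.drop ((cs.takeWhile notNL).length + 1)) := by
        rw [charSplit.eq_def, if_neg heq]
      by_cases hok : sepOkB (PySem.Chars.strip (cs.takeWhile notNL))
      · have hstep : sepLoopB cs 0
            = (cs.takeWhile notNL).length + 1
              + sepLoopB (cs.drop ((cs.takeWhile notNL).length + 1)) 0 := by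
          rw [sepLoopB_unfold]
          rw [if_neg (by simp [hok]), if_neg heq, sepLoopB_shift']
          omega
        rw [hstep, hcs]
        have hbc : bC (cs.takeWhile notNL
              :: charSplit (cs.drop ((cs.takeWhile notNL).length + 1)))
            = bC (charSplit (cs.drop ((cs.takeWhile notNL).length + 1))) + 1 := by
          simp [bC, hok]
        rw [hbc, List.drop_succ_cons]
        rw [← ih _ (by simp only [List.length_drop]; omega), List.drop_drop]
      · have hstep : sepLoopB cs 0 = 0 := by
          rw [sepLoopB_unfold]; simp [hok]
        have hb : bC (charSplit cs) = 0 := by rw [hcs]; simp [bC, hok]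
        rw [hstep, hb]
        simp only [List.drop_zero]
        rw [join_charSplit cs.length cs le_rfl]

-- B's offset takes the accepted lines (up to the trailing cut newline)
theorem take_sepLoopB : ∀ (n : Nat) (cs : List Char), cs.length ≤ n →
    cs.take (sepLoopB cs 0)
      = PySem.Chars.join ['\n'] ((charSplit cs).take (bC (charSplit cs)))
    ∨ cs.take (sepLoopB cs 0)
      = PySem.Chars.join ['\n'] ((charSplit cs).take (bC (charSplit cs))) ++ ['\n'] := by
  intro n
  induction n with
  | zero =>
    intro cs h
    have hnil : cs = [] := by cases cs <;> simp_all
    subst hnil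
    left
    rw [sepLoopB_unfold, charSplit.eq_def]
    by_cases hok : sepOkB (PySem.Chars.strip ([] : List Char)) <;>
      simp [hok, bC, PySem.Chars.join_nil, PySem.Chars.join_singleton]
  | succ n ih =>
    intro cs h
    have hlt : (cs.takeWhile notNL).length ≤ cs.length :=
      (List.takeWhile_prefix _).length_le
    by_cases heq : (cs.takeWhile notNL).length = cs.length
    · have hcs : charSplit cs = [cs.takeWhile notNL] := by
        rw [charSplit.eq_def, if_pos heq]
      by_cases hok : sepOkB (PySem.Chars.strip (cs.takeWhile notNL))
      · left
        have hstep : sepLoopB cs 0 = (cs.takeWhile notNL).length := by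
          rw [sepLoopB_unfold]; simp [hok, heq]
        rw [hstep, hcs]
        have hbc : bC [cs.takeWhile notNL] = 1 := by simp [bC, hok]
        rw [hbc, List.take_succ_cons]
        simp [PySem.Chars.join_singleton,
          List.IsPrefix.eq_of_length (List.takeWhile_prefix _) heq]
      · left
        have hstep : sepLoopB cs 0 = 0 := by
          rw [sepLoopB_unfold]; simp [hok]
        rw [hstep, hcs]
        simp [bC, hok, PySem.Chars.join_nil]
    · have hcs : charSplit cs
          = cs.takeWhile notNL
            :: charSplit (cs.drop ((cs.takeWhile notNL).length + 1)) := by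
        rw [charSplit.eq_def, if_neg heq]
      by_cases hok : sepOkB (PySem.Chars.strip (cs.takeWhile notNL))
      · have hstep : sepLoopB cs 0
            = (cs.takeWhile notNL).length + 1
              + sepLoopB (cs.drop ((cs.takeWhile notNL).length + 1)) 0 := by
          rw [sepLoopB_unfold]
          rw [if_neg (by simp [hok]), if_neg heq, sepLoopB_shift']
          omega
        have hcut : cs.take ((cs.takeWhile notNL).length + 1
              + sepLoopB (cs.drop ((cs.takeWhile notNL).length + 1)) 0)
            = cs.takeWhile notNL
              ++ '\n' :: (cs.drop ((cs.takeWhile notNL).length + 1)).take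
                  (sepLoopB (cs.drop ((cs.takeWhile notNL).length + 1)) 0) := by
          rw [List.take_add]
          have h1 : cs.take ((cs.takeWhile notNL).length + 1)
              = cs.takeWhile notNL ++ ['\n'] := by
            nth_rewrite 2 [sep_decomp cs heq]
            rw [List.take_append, List.take_of_length_le (by omega)]
            have h2 : (cs.takeWhile notNL).length + 1 - (cs.takeWhile notNL).length = 1 := by
              omega
            rw [h2]
            simp
          rw [h1]
          simp
        rw [hstep, hcut, hcs]
        have hbc : bC (cs.takeWhile notNL
              :: charSplit (cs.drop ((cs.takeWhile notNL).length + 1)))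
            = bC (charSplit (cs.drop ((cs.takeWhile notNL).length + 1))) + 1 := by
          simp [bC, hok]
        rw [hbc, List.take_succ_cons]
        by_cases hb : bC (charSplit (cs.drop ((cs.takeWhile notNL).length + 1))) = 0
        · right
          rw [hb, sepLoopB_zero_of_bC_zero _ hb]
          simp [PySem.Chars.join_singleton]
        · obtain ⟨y, ys, hys⟩ := List.exists_cons_of_ne_nil
            (charSplit_ne_nil (cs.drop ((cs.takeWhile notNL).length + 1)))
          obtain ⟨k, hk⟩ := Nat.exists_eq_succ_of_ne_zero hb
          have hk' : bC (y :: ys) = k + 1 := by rw [← hys]; omega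
          have htk : (charSplit (cs.drop ((cs.takeWhile notNL).length + 1))).take
                (bC (charSplit (cs.drop ((cs.takeWhile notNL).length + 1))))
              = y :: (ys.take k) := by
            rw [hys, hk', List.take_succ_cons]
          have hjoin2 : PySem.Chars.join ['\n'] (cs.takeWhile notNL
                :: (charSplit (cs.drop ((cs.takeWhile notNL).length + 1))).take
                    (bC (charSplit (cs.drop ((cs.takeWhile notNL).length + 1)))))
              = cs.takeWhile notNL ++ ['\n']
                ++ PySem.Chars.join ['\n']
                    ((charSplit (cs.drop ((cs.takeWhile notNL).length + 1))).take
                      (bC (charSplit (cs.drop ((cs.takeWhile notNL).length + 1))))) := by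
            rw [htk, PySem.Chars.join_cons_cons]
          rw [hjoin2]
          rcases ih (cs.drop ((cs.takeWhile notNL).length + 1))
              (by simp only [List.length_drop]; omega) with hih | hih
          · left; rw [hih]; simp
          · right; rw [hih]; simp
      · left
        have hstep : sepLoopB cs 0 = 0 := by
          rw [sepLoopB_unfold]; simp [hok]
        have hb : bC (charSplit cs) = 0 := by rw [hcs]; simp [bC, hok]
        rw [hstep, hb]
        simp [PySem.Chars.join_nil]

-- stripping ignores a trailing newline
theorem rstrip_append_newline (xs : List Char) :
    PySem.Chars.rstrip (xs ++ ['\n']) = PySem.Chars.rstrip xs := by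
  simp [PySem.Chars.rstrip, List.reverse_append]
  simp [PySem.Chars.isspace]

theorem strip_append_newline (xs : List Char) :
    PySem.Chars.strip (xs ++ ['\n']) = PySem.Chars.strip xs := by
  simp only [PySem.Chars.strip, PySem.Chars.lstrip]
  rw [List.dropWhile_append]
  by_cases hx : (List.dropWhile PySem.Chars.isspace xs).isEmpty
  · rw [if_pos hx]
    rw [List.isEmpty_iff] at hx
    rw [hx]
    simp [PySem.Chars.isspace, PySem.Chars.rstrip]
  · rw [if_neg hx]
    exact rstrip_append_newline _

-- ===== VERDICT (by name: the statement is the Claim_ definition above) =====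
theorem separate_imports_py_spec : Claim_equal_separate_imports_py := by
  intro code _
  unfold Spec_separate_imports_py
  simp only [separate_imports_py, separate_imports_py_alt]
  have hsplit : (PySem.Str.split? code "\n").getD []
      = (charSplit code.toList).map String.ofList := by
    simp [PySem.Str.split?, PySem.Chars.split?, splitOn_newline]
  rw [hsplit, sepLoopA_true]
  simp only [List.nil_append, sepBoundary_map, ← List.map_take, ← List.map_drop]
  have hjoin : ∀ (xs : List (List Char)),
      PySem.Str.join "\n" (xs.map String.ofList)
        = String.ofList (PySem.Chars.join ['\n'] xs) := by
    intro xs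
    simp [PySem.Str.join, Function.comp_def]
  rw [hjoin, hjoin]
  have hstrip : ∀ (z : List Char),
      PySem.Str.strip (String.ofList z) = String.ofList (PySem.Chars.strip z) := by
    intro z
    simp [PySem.Str.strip]
  rw [hstrip, hstrip, hstrip, hstrip]
  refine Prod.ext ?_ ?_
  · show String.ofList (PySem.Chars.strip (PySem.Chars.join ['\n']
        ((charSplit code.toList).take (bC (charSplit code.toList))))) = _
    rcases take_sepLoopB code.toList.length code.toList le_rfl with hih | hih
    · rw [← hih]
    · rw [hih, strip_append_newline]
  · show String.ofList (PySem.Chars.strip (PySem.Chars.join ['\n']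
        ((charSplit code.toList).drop (bC (charSplit code.toList))))) = _
    rw [← drop_sepLoopB code.toList.length code.toList le_rfl]
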